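-- pv_equiv track=rewrite | github.com/miliar/Code_Jam_Webscraper | solutions_python/Problem_156/721.py | iterat
-- ===== SOURCE A (Python) =====
-- import copy
--
-- def children(config, maxi, count):
--     children = []
--     base = list(filter(lambda x: x != maxi, config))
--     for i in range(int((maxi+1)/2), maxi-1):
--         nodes = copy.deepcopy(base)
--         for c in range(count):
--             nodes.append(i)
--             nodes.append(maxi-i)
--         children.append(nodes)
--     return children
--
-- def iterat(plates):
--     tree = [[plates]]
--     counts = []
--     minSteps = 2000
--
--     while True:
--         while len(tree[-1]) == 0:
--             # go up
--             tree.pop()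
--             if tree == []: return minSteps
--             count = counts.pop()
--
--         curNode = tree[-1].pop()
--         maxi = max(curNode)
--         count = curNode.count(maxi)
--         counts.append(count)
--
--         minSteps = min(minSteps, (maxi+sum(counts[:-1])))
--
--         if maxi > 3:
--             # new level
--             tree.append(children(curNode, maxi, count))
--         else:
--             counts.pop()
-- ===== SOURCE B (Python) =====
-- def iterat(plates):
--     def dfs(config, acc, best):
--         maxi = max(config)
--         count = config.count(maxi)
--         best = min(best, maxi + acc)
--         if maxi > 3:
--             base = [x for x in config if x != maxi]
--             for i in range((maxi + 1) // 2, maxi - 1):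
--                 best = dfs(base + [i, maxi - i] * count, acc + count, best)
--         return best
--     return dfs(plates, 0, 2000)
-- ===== Notes on version B (the rewrite author's own statement) =====
-- stated objective: simpler
-- what changed: A's explicit-stack DFS (a while-True loop over a stack of pending levels plus a parallel stack of per-level counts whose prefix sum is recomputed at every node) is replaced by a recursive DFS whose accumulator carries the ancestor-count sum, threading the running minimum through the recursion.
-- outside the precondition, e.g. on iterat([]): A raises ValueError, B raises ValueError
import Mathlib
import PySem

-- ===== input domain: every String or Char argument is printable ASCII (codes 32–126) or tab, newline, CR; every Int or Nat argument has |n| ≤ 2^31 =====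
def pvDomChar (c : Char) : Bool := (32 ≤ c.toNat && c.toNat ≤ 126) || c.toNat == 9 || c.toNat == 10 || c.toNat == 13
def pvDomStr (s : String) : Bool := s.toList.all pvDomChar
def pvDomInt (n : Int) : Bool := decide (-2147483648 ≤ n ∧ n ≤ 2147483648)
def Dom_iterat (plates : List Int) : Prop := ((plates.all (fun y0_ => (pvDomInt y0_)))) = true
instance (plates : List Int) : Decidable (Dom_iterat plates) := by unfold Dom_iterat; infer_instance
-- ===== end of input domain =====

-- B replaces A's explicit-stack DFS (a stack of pending levels plus a parallel stack of
-- counts) by a recursive DFS that carries the ancestor-count sum as an accumulator.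

-- shared helper, used only in termination measures and proofs: the children of a config,
-- written as a map over the range with the count pairs as replicate/flatten
def childList (config : List Int) (maxi : Int) (count : Nat) : List (List Int) :=
  (PySem.List.pyRange (PySem.Int.floordiv (maxi + 1) 2) (maxi - 1) 1).map
    (fun i => config.filter (fun x => decide (x ≠ maxi)) ++ (List.replicate count [i, maxi - i]).flatten)

-- termination lemma cited by the ports' decreasing_by: when max(config) > 3, every child
-- has a strictly smaller max
theorem mem_childList_max_lt {config c : List Int} {maxi : Int} {count : Nat}
    (hm : (PySem.List.max? config (fun y => y)).getD 0 = maxi) (h3 : 3 < maxi)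
    (hc : c ∈ childList config maxi count) :
    ((PySem.List.max? c (fun y => y)).getD 0).toNat < maxi.toNat := by
  have hxlt : ∀ x ∈ c, x < maxi := by
    simp only [childList, List.mem_map] at hc
    obtain ⟨i, hi, rfl⟩ := hc
    rw [PySem.List.mem_pyRange_one, PySem.Int.floordiv_eq_ediv_of_pos (by omega)] at hi
    intro x hx
    rcases List.mem_append.1 hx with hx | hx
    · have hxm := List.mem_filter.1 hx
      have hsome : PySem.List.max? config (fun y => y) = some maxi := by
        cases h : PySem.List.max? config (fun y => y) with
        | none => rw [h] at hm; simp at hm; omega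
        | some m => rw [h] at hm; simp at hm; exact congrArg some hm
      have := PySem.List.max?_isMax hsome x hxm.1
      have hne : x ≠ maxi := by simpa using hxm.2
      omega
    · simp only [List.mem_flatten, List.mem_replicate] at hx
      obtain ⟨l, ⟨-, rfl⟩, hxl⟩ := hx
      simp only [List.mem_cons] at hxl
      rcases hxl with rfl | rfl | h
      · omega
      · omega
      · simp at h
  cases h : PySem.List.max? c (fun y => y) with
  | none => simp; omega
  | some m =>
    have hmem := PySem.List.max?_mem h
    have := hxlt m hmem
    simp only [Option.getD_some]
    omega

theorem attach_map_fst {β : Type} (l : List (List Int)) (f : List Int → β) :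
    l.attach.map (fun c => f c.1) = l.map f := by
  induction l with
  | nil => rfl
  | cons a t ih => simp_all [List.attach_cons, List.map_map, Function.comp]

theorem map_childList {β : Type} (config : List Int) (maxi : Int) (count : Nat) (f : List Int → β) :
    (childList config maxi count).map f
      = (PySem.List.pyRange (PySem.Int.floordiv (maxi + 1) 2) (maxi - 1) 1).map
          (fun i => f (config.filter (fun x => decide (x ≠ maxi)) ++ (List.replicate count [i, maxi - i]).flatten)) := by
  rw [childList, List.map_map]; rfl

-- number of nodes of the search tree below a config (termination-measure helper)
def weight (config : List Int) : Nat :=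
  let maxi := (PySem.List.max? config (fun y => y)).getD 0
  if h : 3 < maxi then
    1 + ((childList config maxi (config.count maxi)).attach.map (fun c => weight c.1)).sum
  else 1
termination_by ((PySem.List.max? config (fun y => y)).getD 0).toNat
decreasing_by exact mem_childList_max_lt rfl h c.2

theorem weight_pos (config : List Int) : 1 ≤ weight config := by
  rw [weight]; split <;> omega

theorem weight_children (config : List Int)
    (h3 : 3 < (PySem.List.max? config (fun y => y)).getD 0) :
    weight config = 1 + ((childList config ((PySem.List.max? config (fun y => y)).getD 0)
      (config.count ((PySem.List.max? config (fun y => y)).getD 0))).map weight).sum := by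
  rw [weight, dif_pos h3, attach_map_fst]

-- ===== PORT A =====
-- `children(config, maxi, count)`.  int((maxi+1)/2) is ported as floor division: `children`
-- is only reached with maxi = max(curNode) > 3, where the float truncation is exact and
-- equal to floor division.
def childrenA (config : List Int) (maxi : Int) (count : Nat) : List (List Int) :=
  let base := config.filter (fun x => decide (x ≠ maxi))
  (PySem.List.pyRange (PySem.Int.floordiv (maxi + 1) 2) (maxi - 1) 1).map
    (fun i => (List.range count).foldl (fun nodes _ => nodes ++ [i, maxi - i]) base)

theorem childrenA_eq (config : List Int) (maxi : Int) (count : Nat) :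
    childrenA config maxi count = childList config maxi count := by
  have key : ∀ (n : Nat) (b : List Int) (p : List Int),
      (List.range n).foldl (fun nodes _ => nodes ++ p) b = b ++ (List.replicate n p).flatten := by
    intro n
    induction n with
    | zero => simp
    | succ n ih =>
      intro b p
      rw [List.range_succ, List.foldl_append, ih]
      simp [List.replicate_succ']
  unfold childrenA childList
  refine List.map_congr_left (fun i _ => ?_)
  rw [key]

-- the while-True machine of A.  Python's stacks grow/pop at the END of the lists; here each
-- stack is represented with its top (Python's last element) at the HEAD, so tree.append /
-- tree[-1].pop() / counts.append / counts.pop() are cons / head-pop; accordingly the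
-- children list is pushed reversed, matching Python's pop-from-the-end visiting order.
-- max(curNode) raises on an empty curNode (only reachable for plates = [], excluded by
-- Pre_iterat); the port's .getD 0 there is a totality guard, as is the counts.tail for
-- counts.pop().
def loopA (tree : List (List (List Int))) (counts : List Int) (minSteps : Int) : Int :=
  match tree with
  | [] => minSteps            -- unreachable from iterat; keeps the match total
  | [] :: rest =>             -- inner while: go up
    match rest with
    | [] => minSteps          -- tree == []: return minSteps
    | l :: r => loopA (l :: r) counts.tail minSteps   -- count = counts.pop()
  | (curNode :: restTop) :: rest =>                   -- curNode = tree[-1].pop()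
    let maxi := (PySem.List.max? curNode (fun y => y)).getD 0
    let count := curNode.count maxi
    let counts2 := (count : Int) :: counts            -- counts.append(count)
    let minSteps2 := min minSteps (maxi + counts2.tail.sum)   -- maxi + sum(counts[:-1])
    if 3 < maxi then
      loopA ((childrenA curNode maxi count).reverse :: restTop :: rest) counts2 minSteps2
    else
      loopA (restTop :: rest) counts2.tail minSteps2  -- counts.pop()
termination_by 2 * (tree.map (fun lvl => (lvl.map weight).sum)).sum + tree.length
decreasing_by
  · simp
  · rename_i h3
    have hw := weight_children curNode h3
    have hrev : (((childrenA curNode ((PySem.List.max? curNode (fun y => y)).getD 0)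
          (curNode.count ((PySem.List.max? curNode (fun y => y)).getD 0))).reverse).map weight).sum
        = ((childList curNode ((PySem.List.max? curNode (fun y => y)).getD 0)
          (curNode.count ((PySem.List.max? curNode (fun y => y)).getD 0))).map weight).sum := by
      rw [List.map_reverse, List.sum_reverse, childrenA_eq]
    simp only [List.map_cons, List.sum_cons, List.length_cons]
    omega
  · have := weight_pos curNode
    simp only [List.map_cons, List.sum_cons, List.length_cons]
    omega

def iterat (plates : List Int) : Int :=
  loopA [[plates]] [] 2000

-- ===== PORT B =====
-- recursive DFS; `acc` is the sum of the counts of the strict ancestors of `config`.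
-- max(config) raises only for plates = [] (excluded by Pre_iterat): .getD 0 is a totality guard.
mutual
def dfsB (config : List Int) (acc best : Int) : Int :=
  let maxi := (PySem.List.max? config (fun y => y)).getD 0
  let count := config.count maxi
  let best2 := min best (maxi + acc)
  if 3 < maxi then
    -- `base` (the filter) is inlined into the call; Python binds it just above the loop
    dfsFor (PySem.List.pyRange (PySem.Int.floordiv (maxi + 1) 2) (maxi - 1) 1)
      (config.filter (fun x => decide (x ≠ maxi))) maxi count (acc + (count : Int)) best2
  else best2
termination_by 2 * weight config
decreasing_by
  rename_i h3
  have hw := weight_children config h3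
  have hsum : ((childList config ((PySem.List.max? config (fun y => y)).getD 0)
        (config.count ((PySem.List.max? config (fun y => y)).getD 0))).map weight).sum
      = ((PySem.List.pyRange (PySem.Int.floordiv (((PySem.List.max? config (fun y => y)).getD 0) + 1) 2)
          (((PySem.List.max? config (fun y => y)).getD 0) - 1) 1).map
          (fun i => weight (config.filter (fun x => decide (x ≠ (PySem.List.max? config (fun y => y)).getD 0))
            ++ (List.replicate (config.count ((PySem.List.max? config (fun y => y)).getD 0))
                [i, ((PySem.List.max? config (fun y => y)).getD 0) - i]).flatten))).sum :=
    congrArg List.sum (map_childList config _ _ weight)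
  omega

-- the `for i in range(...)` loop of dfs, threading `best`
def dfsFor (is : List Int) (base : List Int) (maxi : Int) (count : Nat) (acc best : Int) : Int :=
  match is with
  | [] => best
  | i :: rest =>
    dfsFor rest base maxi count acc
      (dfsB (base ++ (List.replicate count [i, maxi - i]).flatten) acc best)
termination_by
  2 * ((is.map (fun i => weight (base ++ (List.replicate count [i, maxi - i]).flatten))).sum) + 1
decreasing_by
  · simp only [List.map_cons, List.sum_cons]
    have := weight_pos (base ++ (List.replicate count [i, maxi - i]).flatten)
    omega
  · simp only [List.map_cons, List.sum_cons]
    have := weight_pos (base ++ (List.replicate count [i, maxi - i]).flatten)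
    omega
end

def iterat_alt (plates : List Int) : Int :=
  dfsB plates 0 2000

-- ===== PRECONDITION & SPEC =====
-- Python A raises ValueError (max() of an empty sequence) on plates = []; excluded.
def Pre_iterat (plates : List Int) : Prop := plates ≠ []
instance (plates : List Int) : Decidable (Pre_iterat plates) := by unfold Pre_iterat; infer_instance
def pvWitness_iterat : List Int := [9, 2]

def Spec_iterat (plates : List Int) (out : Int) : Prop := out = iterat_alt plates
instance (plates : List Int) (out : Int) : Decidable (Spec_iterat plates out) := by unfold Spec_iterat; infer_instance

-- ===== CLAIM (what is proved, stated in full; the proofs are below) =====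
def Claim_equal_iterat : Prop := ∀ (plates : List Int), Dom_iterat plates → Pre_iterat plates → Spec_iterat plates (iterat plates)

-- ===== LEMMAS AND PROOFS =====

-- the pure value of B's dfs: the minimum of maxi + acc over the subtree (proof-side only)
def nodeMin (config : List Int) (acc : Int) : Int :=
  let maxi := (PySem.List.max? config (fun y => y)).getD 0
  if h : 3 < maxi then
    ((childList config maxi (config.count maxi)).attach.map
      (fun c => nodeMin c.1 (acc + (config.count maxi : Int)))).foldl min (maxi + acc)
  else maxi + acc
termination_by ((PySem.List.max? config (fun y => y)).getD 0).toNat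
decreasing_by exact mem_childList_max_lt rfl h c.2

theorem foldl_min_pull (l : List Int) (b x : Int) :
    l.foldl min (min b x) = min b (l.foldl min x) := by
  induction l generalizing x with
  | nil => rfl
  | cons c t ih => simp only [List.foldl_cons, min_assoc, ih]

-- dfsB computes min best (nodeMin config acc); dfsFor folds nodeMin over the children
theorem dfsB_eq_min_nodeMin (n : Nat) :
    (∀ config acc best, 2 * weight config ≤ n →
      dfsB config acc best = min best (nodeMin config acc)) ∧
    (∀ (is base : List Int) (maxi : Int) (count : Nat) (acc best : Int),
      2 * ((is.map (fun i => weight (base ++ (List.replicate count [i, maxi - i]).flatten))).sum) + 1 ≤ n →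
      dfsFor is base maxi count acc best =
        (is.map (fun i => nodeMin (base ++ (List.replicate count [i, maxi - i]).flatten) acc)).foldl min best) := by
  induction n with
  | zero =>
    constructor
    · intro config acc best hn; have := weight_pos config; omega
    · intro is base maxi count acc best h; omega
  | succ n ih =>
    constructor
    · intro config acc best h
      by_cases h3 : 3 < (PySem.List.max? config (fun y => y)).getD 0
      · obtain ⟨ih1, ih2⟩ := ih
        rw [dfsB.eq_def, if_pos h3, nodeMin, dif_pos h3]
        set M := (PySem.List.max? config (fun y => y)).getD 0 with hM
        set K := List.count M config with hK
        have hattach : (childList config M K).attach.map (fun c => nodeMin c.1 (acc + (K : Int)))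
            = (childList config M K).map (fun c => nodeMin c (acc + (K : Int))) :=
          attach_map_fst (childList config M K) (fun c => nodeMin c (acc + (K : Int)))
        rw [hattach, map_childList]
        have hw := weight_children config h3
        rw [← hM, ← hK, map_childList] at hw
        rw [ih2 (PySem.List.pyRange (PySem.Int.floordiv (M + 1) 2) (M - 1) 1)
          (config.filter (fun x => decide (x ≠ M))) M K (acc + (K : Int)) (min best (M + acc))
          (by omega)]
        rw [foldl_min_pull]
      · rw [dfsB.eq_def, if_neg h3, nodeMin, dif_neg h3]
    · intro is base maxi count acc best h
      cases is with
      | nil => rw [dfsFor.eq_def]; rfl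
      | cons i rest =>
        rw [dfsFor.eq_def]
        simp only [List.map_cons, List.sum_cons] at h ⊢
        have hc := weight_pos (base ++ (List.replicate count [i, maxi - i]).flatten)
        rw [ih.2 rest base maxi count acc _ (by omega), ih.1 _ acc best (by omega)]
        rw [List.foldl_cons]

theorem dfsB_eq (config : List Int) (acc best : Int) :
    dfsB config acc best = min best (nodeMin config acc) :=
  (dfsB_eq_min_nodeMin (2 * weight config)).1 config acc best le_rfl

-- processing a level head-first (machine order); equal to a min-fold, hence order-independent
def go (lvl : List (List Int)) (acc best : Int) : Int :=
  lvl.foldl (fun b c => dfsB c acc b) best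

theorem go_eq_foldl_min (lvl : List (List Int)) (acc best : Int) :
    go lvl acc best = (lvl.map (fun c => nodeMin c acc)).foldl min best := by
  induction lvl generalizing best with
  | nil => rfl
  | cons c t ih =>
    simp only [go, List.foldl_cons, List.map_cons] at *
    rw [dfsB_eq, ih]

theorem go_reverse (lvl : List (List Int)) (acc best : Int) :
    go lvl.reverse acc best = go lvl acc best := by
  rw [go_eq_foldl_min, go_eq_foldl_min, List.map_reverse]
  letI : RightCommutative (fun (b x : Int) => min b x) :=
    ⟨fun b x y => by simp [min_assoc, min_comm x y]⟩
  exact (List.reverse_perm _).foldl_eq best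

theorem go_children_eq_dfsB (c : List Int) (counts : List Int) (b : Int)
    (h3 : 3 < (PySem.List.max? c (fun y => y)).getD 0) :
    go ((childrenA c ((PySem.List.max? c (fun y => y)).getD 0)
          (c.count ((PySem.List.max? c (fun y => y)).getD 0))).reverse)
        ((c.count ((PySem.List.max? c (fun y => y)).getD 0) : Int) + counts.sum)
        (min b (((PySem.List.max? c (fun y => y)).getD 0) + counts.sum))
      = dfsB c counts.sum b := by
  rw [go_reverse, childrenA_eq, go_eq_foldl_min, dfsB, if_pos h3,
      (dfsB_eq_min_nodeMin _).2 _ _ _ _ _ _ le_rfl, map_childList, Int.add_comm counts.sum]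

-- the machine processes its top level with acc = counts.sum, then resumes below
theorem loopA_eq_go (n : Nat) :
    ∀ (lvl : List (List Int)) (rest : List (List (List Int))) (counts : List Int) (b : Int),
    2 * ((lvl :: rest).map (fun l => (l.map weight).sum)).sum + (lvl :: rest).length ≤ n →
    loopA (lvl :: rest) counts b =
      (match rest with
       | [] => go lvl counts.sum b
       | l :: r => loopA (l :: r) counts.tail (go lvl counts.sum b)) := by
  induction n with
  | zero => intro lvl rest counts b h; simp at h
  | succ n ih =>
    intro lvl rest counts b h
    cases lvl with
    | nil => cases rest <;> rw [loopA] <;> rfl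
    | cons c lvl' =>
      rw [loopA]
      simp only [List.map_cons, List.sum_cons, List.length_cons] at h
      have hwc := weight_pos c
      by_cases h3 : 3 < (PySem.List.max? c (fun y => y)).getD 0
      · rw [if_pos h3]
        have hw := weight_children c h3
        have hrev : (((childrenA c ((PySem.List.max? c (fun y => y)).getD 0)
              (c.count ((PySem.List.max? c (fun y => y)).getD 0))).reverse).map weight).sum
            = ((childList c ((PySem.List.max? c (fun y => y)).getD 0)
              (c.count ((PySem.List.max? c (fun y => y)).getD 0))).map weight).sum := by
          rw [List.map_reverse, List.sum_reverse, childrenA_eq]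
        rw [ih _ _ _ _ (by simp only [List.map_cons, List.sum_cons, List.length_cons, hrev]; omega)]
        simp only [List.tail_cons, List.sum_cons]
        rw [ih _ _ _ _ (by simp only [List.map_cons, List.sum_cons, List.length_cons]; omega)]
        rw [go_children_eq_dfsB c counts b h3]
        cases rest <;> simp [go]
      · rw [if_neg h3]
        rw [ih _ _ _ _ (by simp only [List.map_cons, List.sum_cons, List.length_cons]; omega)]
        have hgo : min b ((PySem.List.max? c (fun y => y)).getD 0 + counts.sum)
            = dfsB c counts.sum b := by
          rw [dfsB.eq_def, if_neg h3]
        simp only [List.tail_cons]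
        rw [hgo]
        cases rest <;> simp [go]

-- ===== VERDICT (by name: the statement is the Claim_ definition above) =====
theorem iterat_spec : Claim_equal_iterat := by
  intro plates _ _
  unfold Spec_iterat iterat iterat_alt
  rw [loopA_eq_go (2 * ((([plates] : List (List Int)) :: ([] : List (List (List Int)))).map
      (fun l => (l.map weight).sum)).sum + 1) _ _ _ _ le_rfl]
  simp [go]
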